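-- pv_equiv track=rewrite | github.com/borjaf696/ShorDEC | Utils/script/PostProcessing/stats.py | __buildReverseCumulative
-- ===== SOURCE A (Python) =====
-- def __buildReverseCumulative(histogram):
--     size, cumm = len(histogram), 0
--     cummHisto = [0]*size
--     for i in range(size, 0, -1):
--         value = histogram[i-1]
--         cummHisto[i-1] = value + cumm
--         cumm += value
--     return cummHisto
-- ===== SOURCE B (Python) =====
-- def __buildReverseCumulative(histogram):
--     total = sum(histogram)
--     cummHisto = []
--     running = 0
--     for value in histogram:
--         cummHisto.append(total - running)
--         running += value
--     return cummHisto
-- ===== Notes on version B (the rewrite author's own statement) =====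
-- stated objective: alternative
-- what changed: Replaces the backward loop that writes suffix sums into a preallocated index-addressed array with a precomputed total and a single forward append loop that subtracts the running strict prefix sum.
import Mathlib
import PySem

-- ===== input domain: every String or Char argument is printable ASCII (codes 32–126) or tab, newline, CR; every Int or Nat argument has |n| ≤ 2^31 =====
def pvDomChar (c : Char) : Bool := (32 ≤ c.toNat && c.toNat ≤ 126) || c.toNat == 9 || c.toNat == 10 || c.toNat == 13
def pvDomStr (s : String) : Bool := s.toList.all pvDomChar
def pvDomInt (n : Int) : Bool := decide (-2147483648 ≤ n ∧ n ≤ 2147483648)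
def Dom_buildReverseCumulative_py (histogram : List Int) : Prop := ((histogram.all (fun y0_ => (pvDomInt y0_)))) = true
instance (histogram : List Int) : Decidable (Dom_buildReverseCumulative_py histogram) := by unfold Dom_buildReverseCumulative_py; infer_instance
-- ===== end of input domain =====

-- B replaces A's backward index-writing loop with a precomputed total plus a forward append loop
-- subtracting the running prefix sum (objective: alternative decomposition, same O(n) cost).


-- ===== PORT A =====
-- the 'for i in range(size, 0, -1)' loop, one recursive step per iteration (the counter i here
-- is the Python i-1); cummHisto[i-1] = value + cumm via List.set, cumm += value carried along
def buildReverseCumulative_py_loop (histogram : List Int) : Nat → List Int → Int → List Int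
  | 0, cummHisto, _ => cummHisto
  | i + 1, cummHisto, cumm =>
      let value := (PySem.List.pyGet? histogram (Int.ofNat i)).getD 0  -- index always in range
      buildReverseCumulative_py_loop histogram i (cummHisto.set i (value + cumm)) (cumm + value)

def buildReverseCumulative_py (histogram : List Int) : List Int :=
  let size := histogram.length
  buildReverseCumulative_py_loop histogram size (List.replicate size 0) 0

-- ===== PORT B =====
-- total = sum(histogram); forward loop appending total - running, running += value
def buildReverseCumulative_py_alt (histogram : List Int) : List Int :=
  let total := histogram.foldl (· + ·) 0
  (histogram.foldl
    (fun (st : List Int × Int) value => (st.1 ++ [total - st.2], st.2 + value))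
    ([], 0)).1

-- ===== PRECONDITION & SPEC =====
def Spec_buildReverseCumulative_py (histogram : List Int) (out : List Int) : Prop := out = buildReverseCumulative_py_alt histogram
instance (histogram : List Int) (out : List Int) : Decidable (Spec_buildReverseCumulative_py histogram out) := by unfold Spec_buildReverseCumulative_py; infer_instance

-- ===== CLAIM (what is proved, stated in full; the proofs are below) =====
def Claim_equal_buildReverseCumulative_py : Prop := ∀ (histogram : List Int), Dom_buildReverseCumulative_py histogram → Spec_buildReverseCumulative_py histogram (buildReverseCumulative_py histogram)

-- ===== LEMMAS AND PROOFS =====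

-- common characterisation: the list of suffix sums
def pvSfx : List Int → List Int
  | [] => []
  | v :: t => (v + t.sum) :: pvSfx t

-- A-side invariant
theorem loopA_inv (histogram : List Int) (i : Nat) (c : List Int)
    (hi : i ≤ histogram.length) (hc : c.length = histogram.length) :
    buildReverseCumulative_py_loop histogram i c ((histogram.drop i).sum)
      = (List.range i).map (fun j => (histogram.drop j).sum) ++ c.drop i := by
  induction i generalizing c with
  | zero => simp [buildReverseCumulative_py_loop]
  | succ i ih =>
    have hlt : i < histogram.length := hi
    have hget : PySem.List.pyGet? histogram (Int.ofNat i) = some histogram[i] := by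
      simp [List.getElem?_eq_getElem, hlt]
    have hdrop : histogram.drop i = histogram[i] :: histogram.drop (i + 1) :=
      List.drop_eq_getElem_cons hlt
    have hsum : histogram[i] + (histogram.drop (i + 1)).sum = (histogram.drop i).sum := by
      rw [hdrop, List.sum_cons]
    have hcum : (histogram.drop (i + 1)).sum + histogram[i] = (histogram.drop i).sum := by
      rw [← hsum]; ring
    have hstep : buildReverseCumulative_py_loop histogram (i + 1) c ((histogram.drop (i+1)).sum)
        = buildReverseCumulative_py_loop histogram i
            (c.set i ((histogram.drop i).sum)) ((histogram.drop i).sum) := by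
      simp only [buildReverseCumulative_py_loop, hget, Option.getD_some, hsum, hcum]
    rw [hstep, ih (c.set i ((histogram.drop i).sum)) (Nat.le_of_lt hlt) (by simp [hc])]
    have hci : i < c.length := by omega
    have hsetdrop : (c.set i ((histogram.drop i).sum)).drop i
        = ((histogram.drop i).sum) :: c.drop (i + 1) := by
      have := List.drop_eq_getElem_cons (l := c.set i ((histogram.drop i).sum))
        (by simpa using hci)
      simpa [List.getElem_set_self, List.drop_set_of_lt] using this
    rw [hsetdrop, List.range_succ]
    simp

theorem range_map_drop_sum (histogram : List Int) :
    (List.range histogram.length).map (fun j => (histogram.drop j).sum) = pvSfx histogram := by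
  induction histogram with
  | nil => simp [pvSfx]
  | cons v t ih =>
    rw [List.length_cons, List.range_succ_eq_map, List.map_cons, List.map_map, pvSfx, ← ih]
    simp [Function.comp_def, List.sum_cons, List.drop_succ_cons]

theorem portA_eq_sfx (histogram : List Int) :
    buildReverseCumulative_py histogram = pvSfx histogram := by
  have h := loopA_inv histogram histogram.length (List.replicate histogram.length 0)
    (le_refl _) (by simp)
  simp only [List.drop_length, List.sum_nil] at h
  simpa [buildReverseCumulative_py, range_map_drop_sum] using h

-- B-side: the foldl accumulator splits off
def pvG (total : Int) : List Int → Int → List Int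
  | [], _ => []
  | v :: t, running => (total - running) :: pvG total t (running + v)

theorem foldB_eq_pvG (total : Int) (l : List Int) :
    ∀ (acc : List Int) (running : Int),
    (l.foldl (fun (st : List Int × Int) value => (st.1 ++ [total - st.2], st.2 + value))
      (acc, running)).1 = acc ++ pvG total l running := by
  induction l with
  | nil => intro acc running; simp [pvG]
  | cons v t ih =>
    intro acc running
    simp only [List.foldl_cons, pvG]
    rw [ih]
    simp

theorem pvG_eq_sfx (l : List Int) : ∀ (running : Int), pvG (running + l.sum) l running = pvSfx l := by
  induction l with
  | nil => intro running; simp [pvG, pvSfx]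
  | cons v t ih =>
    intro running
    simp only [pvG, pvSfx, List.sum_cons]
    rw [show running + (v + t.sum) - running = v + t.sum from by ring,
        show running + (v + t.sum) = running + v + t.sum from by ring, ih]

theorem portB_eq_sfx (histogram : List Int) :
    buildReverseCumulative_py_alt histogram = pvSfx histogram := by
  unfold buildReverseCumulative_py_alt
  rw [foldB_eq_pvG]
  have hs : histogram.foldl (· + ·) 0 = histogram.sum := by
    simpa using (List.sum_eq_foldl (l := histogram)).symm
  simp only [hs, List.nil_append]
  have := pvG_eq_sfx histogram 0
  simpa using this

-- ===== VERDICT (by name: the statement is the Claim_ definition above) =====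
theorem buildReverseCumulative_py_spec : Claim_equal_buildReverseCumulative_py := by
  intro histogram _
  unfold Spec_buildReverseCumulative_py
  rw [portA_eq_sfx, portB_eq_sfx]
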